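-- pv_equiv track=rewrite | github.com/compsys-progtools/courseutils | cspt/badges.py | badges_by_type
-- ===== SOURCE A (Python) =====
-- badge_types = ['experience','review','practice','explore','build','lab','community','prepare']
--
-- def badges_by_type(approved_prs):
--     '''
--     parse list of approved PRs to filter for badges
--
--     Parameters
--     ----------
--     approved_prs : list
--         list of titles or list of dicts with 'title' as a key
--
--     Returns
--     -------
--     badges_by_type: dict
--         dict with keys as badge types, keys as input type
--     '''
--     if type(approved_prs[0])==str:
--         badges_by_type = {btype:[title for title in approved_prs if btype in title.lower()]
--                           for btype in badge_types}
--     else: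
--         badges_by_type = {btype:[pr for pr in approved_prs if btype in pr['title'].lower()]
--                           for btype in badge_types}
--
--     badges_by_type.pop('prepare')
--     return badges_by_type
-- ===== SOURCE B (Python) =====
-- badge_types = ['experience','review','practice','explore','build','lab','community','prepare']
--
--
-- def badges_by_type(approved_prs):
--     keys = [b for b in badge_types if b != 'prepare']
--     as_str = type(approved_prs[0]) == str
--     # stage 1: one pass over the PRs; each title is lowered once and compressed
--     # into a small integer bitmask recording which badge keys occur in it
--     masks = []
--     for pr in approved_prs:
--         low = (pr if as_str else pr['title']).lower()
--         m = 0
--         for k, b in enumerate(keys):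
--             if b in low:
--                 m |= 1 << k
--         masks.append(m)
--     # stage 2: build every bucket from the bit matrix alone, no string work
--     return {b: [pr for pr, m in zip(approved_prs, masks) if (m >> k) & 1]
--             for k, b in enumerate(keys)}
-- ===== Notes on version B (the rewrite author's own statement) =====
-- stated objective: alternative
-- what changed: B is a two-stage matrix algorithm: one pass over the PRs compresses each title (lowered once) into an integer bitmask of matching badge keys, then every bucket is assembled from the bit matrix by bit tests alone, with no string scanning; A instead rescans and re-lowercases the whole PR list once per badge type via dict comprehensions and then pops 'prepare'. The ports cover the list-of-title-strings branch fixed by the task's List String signature; Pre_ excludes only the empty list, on which A raises IndexError.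
import Mathlib
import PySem

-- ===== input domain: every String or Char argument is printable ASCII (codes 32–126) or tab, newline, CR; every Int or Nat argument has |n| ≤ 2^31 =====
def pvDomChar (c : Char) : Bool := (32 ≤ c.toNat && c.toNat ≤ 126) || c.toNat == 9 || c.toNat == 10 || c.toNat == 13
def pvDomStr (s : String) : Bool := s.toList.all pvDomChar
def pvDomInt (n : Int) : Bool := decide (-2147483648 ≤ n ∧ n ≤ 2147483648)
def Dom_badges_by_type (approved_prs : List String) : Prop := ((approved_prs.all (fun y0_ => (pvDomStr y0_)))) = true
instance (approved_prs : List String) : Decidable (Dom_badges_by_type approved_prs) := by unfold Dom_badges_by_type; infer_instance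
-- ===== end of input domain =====

-- B replaces A's per-badge-type rescans (then pop('prepare')) by a two-stage matrix algorithm:
-- one pass turns each title (lowered once) into a bitmask of matching keys, then buckets are
-- built from the bit matrix by bit tests alone; equivalence proved on nonempty string lists.


def badgeTypes : List String := ["experience","review","practice","explore","build","lab","community","prepare"]

-- ===== PORT A =====
-- A: dict comprehension {btype: [title for title in approved_prs if btype in title.lower()] for btype in badge_types},
-- then .pop('prepare').  approved_prs[0] raises IndexError on [] (excluded by Pre_); with the List String
-- signature the str branch is the one taken.
def badges_by_type (approved_prs : List String) : List (String × List String) :=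
  match approved_prs with
  | [] => []   -- Python: approved_prs[0] raises IndexError here; outside Pre_
  | _ :: _ =>
    let d := badgeTypes.foldl
      (fun d btype => PySem.Dict.insert d btype
        (approved_prs.filter (fun title => PySem.Str.isIn btype (PySem.Str.lower title))))
      PySem.Dict.empty
    (PySem.Dict.erase d "prepare").items

-- ===== PORT B =====
-- B stage 1 inner loop: m = 0; for k, b in enumerate(keys): if b in low: m |= 1 << k.
-- enumerate is ported with Nat indices (List.zipIdx); exact, the Python indices are 0..6 and the masks nonnegative.
def bMask (keys : List String) (low : String) : Nat :=
  keys.zipIdx.foldl (fun m bk => if PySem.Str.isIn bk.1 low then m ||| (1 <<< bk.2) else m) 0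

-- B: keys = badge_types without 'prepare'; masks = the per-PR bitmask list (lower once per title);
-- result = {b: [pr for pr, m in zip(approved_prs, masks) if (m >> k) & 1] for k, b in enumerate(keys)}.
def badges_by_type_alt (approved_prs : List String) : List (String × List String) :=
  match approved_prs with
  | [] => []   -- Python: approved_prs[0] raises IndexError here; outside Pre_
  | _ :: _ =>
    let keys := badgeTypes.filter (fun b => b ≠ "prepare")
    let masks := approved_prs.foldl (fun ms pr => ms ++ [bMask keys (PySem.Str.lower pr)]) []
    keys.zipIdx.map (fun bk =>
      (bk.1, ((approved_prs.zip masks).filter (fun pm => (pm.2 >>> bk.2) &&& 1 != 0)).map Prod.fst))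

-- ===== PRECONDITION & SPEC =====
-- Pre_ excludes only the empty list, on which A (approved_prs[0]) raises IndexError; the list-of-dicts
-- branch of A is outside the task's List String signature, not excluded by Pre_.
def Pre_badges_by_type (approved_prs : List String) : Prop := approved_prs ≠ []
instance (approved_prs : List String) : Decidable (Pre_badges_by_type approved_prs) := by unfold Pre_badges_by_type; infer_instance
def pvWitness_badges_by_type : List String := (["Build a LAB", "review experience"])
def Spec_badges_by_type (approved_prs : List String) (out : List (String × List String)) : Prop := out = badges_by_type_alt approved_prs
instance (approved_prs : List String) (out : List (String × List String)) : Decidable (Spec_badges_by_type approved_prs out) := by unfold Spec_badges_by_type; infer_instance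

-- ===== CLAIM (what is proved, stated in full; the proofs are below) =====
def Claim_equal_badges_by_type : Prop := ∀ (approved_prs : List String), Dom_badges_by_type approved_prs → Pre_badges_by_type approved_prs → Spec_badges_by_type approved_prs (badges_by_type approved_prs)

-- ===== LEMMAS AND PROOFS =====

-- A's eight fresh inserts build exactly the association list over badgeTypes.
lemma foldA (prs : List String) :
    (badgeTypes.foldl
      (fun d btype => PySem.Dict.insert d btype
        (prs.filter (fun title => PySem.Str.isIn btype (PySem.Str.lower title))))
      PySem.Dict.empty).items
    = badgeTypes.map (fun b => (b, prs.filter (fun title => PySem.Str.isIn b (PySem.Str.lower title)))) := by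
  have h := PySem.Dict.items_foldl_insert_fresh (ν := List String) badgeTypes (fun b => b)
    (fun b => prs.filter (fun title => PySem.Str.isIn b (PySem.Str.lower title)))
    PySem.Dict.empty (by intro a _; simp) (by decide)
  simpa using h

-- B's list-append fold is the map of the mask function.
lemma foldMasks (xs : List String) (f : String → Nat) (acc : List Nat) :
    xs.foldl (fun ms pr => ms ++ [f pr]) acc = acc ++ xs.map f := by
  induction xs generalizing acc with
  | nil => simp
  | cons x xs ih => simp [ih]

-- selecting from zip(prs, prs.map f) by a test on the mask is filtering prs by the composed test
lemma zip_map_filter (xs : List String) (f : String → Nat) (g : Nat → Bool) :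
    ((xs.zip (xs.map f)).filter (fun pm => g pm.2)).map Prod.fst
      = xs.filter (fun t => g (f t)) := by
  induction xs with
  | nil => rfl
  | cons x xs ih =>
    by_cases h : g (f x) = true <;> simp [h, ih]

-- a bucket built from the zipped mask column is a plain filter of the PR list
lemma bucket (xs : List String) (f : String → Nat) (k : Nat) :
    ((xs.zip (xs.foldl (fun ms pr => ms ++ [f pr]) [])).filter
        (fun pm => pm.2 >>> k &&& 1 != 0)).map Prod.fst
      = xs.filter (fun t => f t >>> k &&& 1 != 0) := by
  rw [foldMasks, List.nil_append, zip_map_filter xs f (fun m => m >>> k &&& 1 != 0)]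

-- the mask fold never touches bits below the running index
lemma foldMask_low (keys : List String) (low : String) :
    ∀ (s acc : Nat) (j : Nat), j < s →
    ((keys.zipIdx s).foldl (fun m bk => if PySem.Str.isIn bk.1 low then m ||| (1 <<< bk.2) else m) acc).testBit j
      = acc.testBit j := by
  induction keys with
  | nil => intro s acc j _; rfl
  | cons b ks ih =>
    intro s acc j hj
    rw [List.zipIdx_cons, List.foldl_cons]
    rw [ih (s + 1) _ j (by omega)]
    split_ifs
    · simp [Nat.testBit_or, Nat.one_shiftLeft, Nat.ne_of_gt hj]
    · rfl

-- bit s + k of the finished mask records whether key k matched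
lemma foldMask_bit (keys : List String) (low : String) :
    ∀ (s acc : Nat), (∀ j, s ≤ j → acc.testBit j = false) →
    ∀ (k : Nat) (hk : k < keys.length),
    ((keys.zipIdx s).foldl (fun m bk => if PySem.Str.isIn bk.1 low then m ||| (1 <<< bk.2) else m) acc).testBit (s + k)
      = PySem.Str.isIn keys[k] low := by
  induction keys with
  | nil => intro _ _ _ k hk; simp at hk
  | cons b ks ih =>
    intro s acc hacc k hk
    rw [List.zipIdx_cons, List.foldl_cons]
    match k with
    | 0 =>
      simp only [Nat.add_zero, List.getElem_cons_zero]
      rw [foldMask_low ks low (s + 1) _ s (by omega)]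
      split_ifs with h
      · simp only [Nat.testBit_or, Nat.one_shiftLeft, Nat.testBit_two_pow, hacc s le_rfl,
          Bool.false_or]
        simpa using h
      · simp only [Bool.not_eq_true] at h
        rw [hacc s le_rfl]
        exact h.symm
    | k + 1 =>
      have : s + (k + 1) = (s + 1) + k := by omega
      rw [this]
      have hacc' : ∀ j, s + 1 ≤ j →
          (if PySem.Str.isIn b low = true then acc ||| (1 <<< s) else acc).testBit j = false := by
        intro j hj
        split_ifs
        · simp [Nat.testBit_or, Nat.one_shiftLeft, Nat.testBit_two_pow, hacc j (by omega)]
          omega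
        · exact hacc j (by omega)
      exact ih (s + 1) _ hacc' k (by simpa using hk)

-- Python's truthiness test (m >> k) & 1 is the k-th bit
lemma shift_and_one (m k : Nat) : (((m >>> k) &&& 1 != 0) : Bool) = m.testBit k := by
  simp [Nat.testBit, Nat.and_comm]

set_option maxHeartbeats 1000000 in
theorem badges_by_type_spec : Claim_equal_badges_by_type := by
  intro prs _ hpre
  unfold Spec_badges_by_type
  match prs, hpre with
  | x :: xs, _ =>
    show (let d := badgeTypes.foldl
            (fun d btype => PySem.Dict.insert d btype
              ((x :: xs).filter (fun title => PySem.Str.isIn btype (PySem.Str.lower title))))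
            PySem.Dict.empty
          (PySem.Dict.erase d "prepare").items)
        = badges_by_type_alt (x :: xs)
    have hkeys : badgeTypes.filter (fun b => b ≠ "prepare")
        = ["experience","review","practice","explore","build","lab","community"] := by
      simp [badgeTypes]
    have hbit : ∀ (k : Nat) (hk : k < 7) (t : String),
        (((bMask ["experience","review","practice","explore","build","lab","community"]
            (PySem.Str.lower t)) >>> k) &&& 1 != 0 : Bool)
          = PySem.Str.isIn (["experience","review","practice","explore","build","lab","community"][k]'(by simpa using hk)) (PySem.Str.lower t) := by
      intro k hk t
      rw [shift_and_one]
      have := foldMask_bit ["experience","review","practice","explore","build","lab","community"]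
        (PySem.Str.lower t) 0 0 (by intro j _; simp) k (by simpa using hk)
      unfold bMask
      simpa only [Nat.zero_add] using this
    simp only [badges_by_type_alt, hkeys,
      List.zipIdx_cons, List.zipIdx_nil, List.map_cons, List.map_nil]
    simp only [Nat.reduceAdd]
    rw [bucket, bucket, bucket, bucket, bucket, bucket, bucket]
    simp only [PySem.Dict.erase, foldA]
    rw [List.filter_map]
    have hPrep : badgeTypes.filter
        ((fun p => !p.1 == "prepare") ∘ (fun b => (b, (x :: xs).filter (fun title => PySem.Str.isIn b (PySem.Str.lower title)))))
        = ["experience","review","practice","explore","build","lab","community"] := by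
      simp [badgeTypes]
    rw [hPrep]
    simp only [List.map_cons, List.map_nil, List.cons.injEq, Prod.mk.injEq, true_and, and_true]
    refine ⟨List.filter_congr (fun t _ => (hbit 0 (by omega) t).symm),
            List.filter_congr (fun t _ => (hbit 1 (by omega) t).symm),
            List.filter_congr (fun t _ => (hbit 2 (by omega) t).symm),
            List.filter_congr (fun t _ => (hbit 3 (by omega) t).symm),
            List.filter_congr (fun t _ => (hbit 4 (by omega) t).symm),
            List.filter_congr (fun t _ => (hbit 5 (by omega) t).symm),
            List.filter_congr (fun t _ => (hbit 6 (by omega) t).symm)⟩
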